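-- pv_equiv track=rewrite | github.com/ffinguMac/BOJ | 백준/Silver/1652. 누울 자리를 찾아라/누울 자리를 찾아라.py | count_vertical
-- ===== SOURCE A (Python) =====
-- def count_vertical(room, n):
--   cnt = 0
--   for j in range(n):
--     consecutive = 0
--     for i in range(n):
--       if room[i][j] == '.':
--         consecutive += 1
--         if consecutive == 2:
--           cnt += 1
--       else:
--         consecutive = 0
--   return cnt
-- ===== SOURCE B (Python) =====
-- def count_vertical(room, n):
--     # Count, per column, the starts of maximal vertical runs of '.' of length >= 2,
--     # by pattern-matching triples (previous, current, next) over the shifted column.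
--     total = 0
--     for j in range(n):
--         col = [room[i][j] for i in range(n)]
--         total += sum(1 for a, b, c in zip(['X'] + col, col, col[1:])
--                      if a != '.' and b == '.' and c == '.')
--     return total
-- ===== Notes on version B (the rewrite author's own statement) =====
-- stated objective: alternative
-- what changed: Replaces A's per-cell consecutive counter (incremented and tested against 2) with a stateless pattern match: each column is zipped with its shifted copies and B counts triples (prev,cur,next) that mark the start of a maximal dot-run of length >= 2.
import Mathlib
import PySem

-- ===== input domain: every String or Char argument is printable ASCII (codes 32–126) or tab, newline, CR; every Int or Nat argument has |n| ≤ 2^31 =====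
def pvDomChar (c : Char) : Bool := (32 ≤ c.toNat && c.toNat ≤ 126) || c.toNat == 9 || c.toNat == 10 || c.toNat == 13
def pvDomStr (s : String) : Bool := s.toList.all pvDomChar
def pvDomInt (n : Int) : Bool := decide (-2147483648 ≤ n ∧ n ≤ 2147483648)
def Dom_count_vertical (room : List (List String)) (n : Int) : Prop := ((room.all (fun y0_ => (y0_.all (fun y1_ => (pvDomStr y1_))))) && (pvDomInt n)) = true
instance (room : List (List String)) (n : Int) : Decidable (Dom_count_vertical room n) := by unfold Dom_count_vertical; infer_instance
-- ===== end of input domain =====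

-- B replaces A's running 'consecutive' counter with a stateless shifted-zip pattern match
-- counting the starts of maximal vertical dot-runs of length >= 2 (alternative decomposition, same cost).

-- room[i][j] (both ports index the same way; Pre_ guarantees the indices are in range)
def pvCell (room : List (List String)) (i j : Int) : String :=
  (PySem.List.pyGet? ((PySem.List.pyGet? room i).getD []) j).getD ""

-- ===== PORT A =====
def count_vertical (room : List (List String)) (n : Int) : Int :=
  (PySem.List.pyRange 0 n 1).foldl
    (fun cnt j =>
      ((PySem.List.pyRange 0 n 1).foldl
        (fun (st : Int × Int) i =>
          if pvCell room i j = "." then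
            let consecutive := st.2 + 1
            if consecutive = 2 then (st.1 + 1, consecutive) else (st.1, consecutive)
          else (st.1, 0))
        (cnt, 0)).1)
    0

-- ===== PORT B =====
def count_vertical_alt (room : List (List String)) (n : Int) : Int :=
  (PySem.List.pyRange 0 n 1).foldl
    (fun total j =>
      let col := (PySem.List.pyRange 0 n 1).map (fun i => pvCell room i j)
      total + ((("X" :: col).zip (col.zip col.tail)).countP
        (fun t => !(t.1 == ".") && (t.2.1 == ".") && (t.2.2 == ".")) : Int))
    0

-- ===== PRECONDITION & SPEC =====
-- Pre_ excludes exactly the inputs on which Python A raises IndexError: it needs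
-- room[i][j] for all 0 ≤ i,j < n, so the first n rows must exist and have length ≥ n.
def Pre_count_vertical (room : List (List String)) (n : Int) : Prop :=
  n ≤ room.length ∧ ∀ row ∈ room.take n.toNat, n ≤ (row.length : Int)
instance (room : List (List String)) (n : Int) : Decidable (Pre_count_vertical room n) := by
  unfold Pre_count_vertical; infer_instance

def pvWitness_count_vertical : List (List String) × Int :=
  ([[".", "."], ["#", "."]], 2)

def Spec_count_vertical (room : List (List String)) (n : Int) (out : Int) : Prop := out = count_vertical_alt room n
instance (room : List (List String)) (n : Int) (out : Int) : Decidable (Spec_count_vertical room n out) := by unfold Spec_count_vertical; infer_instance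

-- ===== CLAIM (what is proved, stated in full; the proofs are below) =====
def Claim_equal_count_vertical : Prop := ∀ (room : List (List String)) (n : Int), Dom_count_vertical room n → Pre_count_vertical room n → Spec_count_vertical room n (count_vertical room n)

-- ===== LEMMAS AND PROOFS =====

-- A's inner loop as a recursion over the column (value added to the running count)
def pvFA : List String → Int → Int
  | [], _ => 0
  | x :: xs, k =>
      if x = "." then (if k + 1 = 2 then 1 else 0) + pvFA xs (k + 1) else pvFA xs 0

-- B's triple count as a recursion over the column ('pd' = previous cell was a dot)
def pvGo : Bool → List String → Int
  | _, [] => 0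
  | _, [_] => 0
  | pd, x :: y :: xs =>
      (if ¬pd ∧ x = "." ∧ y = "." then 1 else 0) + pvGo (decide (x = ".")) (y :: xs)

-- A's inner fold over indices computes pvFA of the accessed column
theorem pvFA_fold (cell : Int → String) (is : List Int) : ∀ (c k : Int),
    (is.foldl
      (fun (st : Int × Int) i =>
        if cell i = "." then
          let consecutive := st.2 + 1
          if consecutive = 2 then (st.1 + 1, consecutive) else (st.1, consecutive)
        else (st.1, 0)) (c, k)).1 = c + pvFA (is.map cell) k := by
  induction is with
  | nil => intro c k; simp [pvFA]
  | cons i is ih =>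
      intro c k
      simp only [List.foldl_cons, List.map_cons]
      by_cases hx : cell i = "."
      · by_cases hk : k + 1 = 2
        · simp [pvFA, hx, hk, ih]; omega
        · simp [pvFA, hx, hk, ih]
      · simp [pvFA, hx, ih]

-- B's zip/countP computes pvGo
theorem pvGo_zip (xs : List String) : ∀ (p : String),
    (((((p :: xs).zip (xs.zip xs.tail)).countP
      (fun t => !(t.1 == ".") && (t.2.1 == ".") && (t.2.2 == "."))) : Nat) : Int)
    = pvGo (decide (p = ".")) xs := by
  induction xs with
  | nil => intro p; simp [pvGo]
  | cons x xs ih =>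
      intro p
      cases xs with
      | nil => simp [pvGo]
      | cons y ys =>
          simp only [List.tail_cons, List.zip_cons_cons, List.countP_cons, pvGo]
          rw [← ih x]
          push_cast
          by_cases hp : p = "." <;> by_cases hx : x = "." <;> by_cases hy : y = "." <;>
            simp [hp, hx, hy] <;> ring

-- the counter recursion and the pattern-match recursion agree
theorem pvFA_eq_pvGo (xs : List String) : ∀ (k : Int), 0 ≤ k →
    pvFA xs k = pvGo (decide (1 ≤ k)) xs
      + (if k = 1 ∧ xs.head? = some "." then 1 else 0) := by
  induction xs with
  | nil => intro k hk; simp [pvFA, pvGo]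
  | cons x xs ih =>
      intro k hk
      by_cases hx : x = "."
      · have hF : pvFA (x :: xs) k = (if k + 1 = 2 then 1 else 0) + pvFA xs (k + 1) := by
          simp [pvFA, hx]
        rw [hF, ih (k + 1) (by omega)]
        have h2 : decide ((1:Int) ≤ k + 1) = true := by simp; omega
        rw [h2]
        cases xs with
        | nil =>
            simp only [pvGo, List.head?_nil, List.head?_cons, hx]
            split_ifs <;> simp_all <;> omega
        | cons y ys =>
            have hG : pvGo (decide (1 ≤ k)) (x :: y :: ys)
                = (if ¬ (decide (1 ≤ k)) = true ∧ x = "." ∧ y = "." then 1 else 0)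
                  + pvGo (decide (x = ".")) (y :: ys) := by
              simp [pvGo]
            rw [hG]
            simp only [hx, List.head?_cons, Option.some.injEq, decide_true]
            by_cases hy : y = "." <;> simp [hy] <;> split_ifs <;> simp_all <;> omega
      · have hF : pvFA (x :: xs) k = pvFA xs 0 := by simp [pvFA, hx]
        rw [hF, ih 0 le_rfl]
        cases xs with
        | nil => simp [pvGo, hx]
        | cons y ys =>
            have hG : pvGo (decide (1 ≤ k)) (x :: y :: ys)
                = (if ¬ (decide (1 ≤ k)) = true ∧ x = "." ∧ y = "." then 1 else 0)
                  + pvGo (decide (x = ".")) (y :: ys) := by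
              simp [pvGo]
            rw [hG]
            simp [hx, show ¬ ((1:Int) ≤ 0) by omega]

-- per-column: A's inner loop equals B's triple count
theorem pv_step_eq (room : List (List String)) (n : Int) (c j : Int) :
    ((PySem.List.pyRange 0 n 1).foldl
      (fun (st : Int × Int) i =>
        if pvCell room i j = "." then
          let consecutive := st.2 + 1
          if consecutive = 2 then (st.1 + 1, consecutive) else (st.1, consecutive)
        else (st.1, 0)) (c, 0)).1
    = (let col := (PySem.List.pyRange 0 n 1).map (fun i => pvCell room i j)
       c + ((("X" :: col).zip (col.zip col.tail)).countP
         (fun t => !(t.1 == ".") && (t.2.1 == ".") && (t.2.2 == ".")) : Int)) := by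
  rw [pvFA_fold (fun i => pvCell room i j) (PySem.List.pyRange 0 n 1) c 0]
  show _ = _ + (_ : Int)
  rw [pvGo_zip ((PySem.List.pyRange 0 n 1).map (fun i => pvCell room i j)) "X"]
  rw [pvFA_eq_pvGo _ 0 le_rfl]
  simp [show ¬ ((1:Int) ≤ 0) by omega]

-- ===== VERDICT (by name: the statement is the Claim_ definition above) =====
theorem count_vertical_spec : Claim_equal_count_vertical := by
  intro room n _ _
  show count_vertical room n = count_vertical_alt room n
  unfold count_vertical count_vertical_alt
  congr 1
  funext total j
  exact pv_step_eq room n total j
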